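-- pv_equiv track=rewrite | github.com/JelenaKiblik/School-python | pr14_exam/exam.py | add_or_subtract
-- ===== SOURCE A (Python) =====
-- def add_or_subtract(numbers):
--     """
--     Return the sum of all numbers in a list.
--
--     The sum is calculated according to following rules:
--         -always start by adding all the numbers together.
--         -if you find a 0, start subtracting all following numbers until you find another 0, then start adding again.
--         -there might be more than two 0 in a list - change +/- with every 0 you find.
--
--     For example:
--         [1, 2, 0, 3, 0, 4] -> 1 + 2 - 3 + 4 = 4
--         [0, 2, 1, 0, 1, 0, 2] -> -2 - 1 + 1 - 2 = -4
--         [1, 2] -> 1 + 2 = 3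
--         [4, 0, 2, 3] = 4 - 2 - 3 = -1
--
--     #2
--
--     :param numbers: the list of number given.
--     :return: the sum of all numbers.
--     """
--     null = False
--     summa = 0
--     for i in numbers:
--         if i == 0 and null is False:
--             null = True
--             continue
--         if i == 0 and null is True:
--             null = False
--             continue
--         if i != 0 and null is False:
--             summa += i
--             continue
--         if i != 0 and null is True:
--             summa -= i
--             continue
--     return summa
-- ===== SOURCE B (Python) =====
-- def add_or_subtract(numbers):
--     # split into segments at every zero (empty segments kept), then
--     # combine segment sums with alternating signs
--     segments = []
--     cur = []
--     for i in numbers: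
--         if i == 0:
--             segments.append(cur)
--             cur = []
--         else:
--             cur.append(i)
--     segments.append(cur)
--     total = 0
--     sign = 1
--     for seg in segments:
--         total += sign * sum(seg)
--         sign = -sign
--     return total
-- ===== Notes on version B (the rewrite author's own statement) =====
-- stated objective: alternative
-- what changed: Replaces the single stateful loop toggling a boolean flag with a two-pass decomposition: split the list into segments at each zero, then combine segment sums with alternating signs.
import Mathlib
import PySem

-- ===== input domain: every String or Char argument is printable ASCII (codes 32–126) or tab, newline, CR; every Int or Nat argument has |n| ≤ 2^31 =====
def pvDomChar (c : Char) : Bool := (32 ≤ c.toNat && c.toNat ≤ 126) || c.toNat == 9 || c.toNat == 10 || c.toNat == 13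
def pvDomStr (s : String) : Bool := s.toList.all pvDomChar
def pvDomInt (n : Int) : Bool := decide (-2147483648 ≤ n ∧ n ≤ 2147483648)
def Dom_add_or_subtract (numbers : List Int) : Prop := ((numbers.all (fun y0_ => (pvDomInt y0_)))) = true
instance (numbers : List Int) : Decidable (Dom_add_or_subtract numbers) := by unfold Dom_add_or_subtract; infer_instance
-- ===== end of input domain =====

-- B replaces A's stateful sign-toggling loop by a two-pass decomposition
-- (split at zeros into segments, then alternating-sign combination of segment sums); objective: alternative.


-- ===== PORT A =====
-- single loop over numbers with state (null, summa); branches in A's order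
def add_or_subtract (numbers : List Int) : Int :=
  (numbers.foldl (fun (st : Bool × Int) i =>
      if i = 0 ∧ st.1 = false then (true, st.2)
      else if i = 0 ∧ st.1 = true then (false, st.2)
      else if i ≠ 0 ∧ st.1 = false then (st.1, st.2 + i)
      else (st.1, st.2 - i))
    (false, 0)).2

-- ===== PORT B =====
-- first pass: split at zeros into (segments, cur)
def pvSplitStep (st : List (List Int) × List Int) (i : Int) : List (List Int) × List Int :=
  if i = 0 then (st.1 ++ [st.2], []) else (st.1, st.2 ++ [i])

-- second pass: combine segment sums with alternating signs
def pvCombineStep (p : Int × Int) (seg : List Int) : Int × Int :=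
  (p.1 + p.2 * seg.sum, -p.2)

def add_or_subtract_alt (numbers : List Int) : Int :=
  let st := numbers.foldl pvSplitStep ([], [])
  let segments := st.1 ++ [st.2]
  (segments.foldl pvCombineStep (0, 1)).1

-- ===== PRECONDITION & SPEC =====
def Spec_add_or_subtract (numbers : List Int) (out : Int) : Prop := out = add_or_subtract_alt numbers
instance (numbers : List Int) (out : Int) : Decidable (Spec_add_or_subtract numbers out) := by unfold Spec_add_or_subtract; infer_instance

-- ===== CLAIM (what is proved, stated in full; the proofs are below) =====
def Claim_equal_add_or_subtract : Prop := ∀ (numbers : List Int), Dom_add_or_subtract numbers → Spec_add_or_subtract numbers (add_or_subtract numbers)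

-- ===== LEMMAS AND PROOFS =====

-- reference function: signed sum with a toggling flag
def pvG (b : Bool) : List Int → Int
  | [] => 0
  | i :: t => if i = 0 then pvG (!b) t else (if b then -i else i) + pvG b t

lemma pvA_fold (l : List Int) : ∀ (b : Bool) (s : Int),
    (l.foldl (fun (st : Bool × Int) i =>
      if i = 0 ∧ st.1 = false then (true, st.2)
      else if i = 0 ∧ st.1 = true then (false, st.2)
      else if i ≠ 0 ∧ st.1 = false then (st.1, st.2 + i)
      else (st.1, st.2 - i))
    (b, s)).2 = s + pvG b l := by
  induction l with
  | nil => intro b s; simp [pvG]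
  | cons i t ih =>
    intro b s
    by_cases hi : i = 0
    · cases b <;> simp [hi, pvG, ih, List.foldl]
    · cases b <;> simp [hi, pvG, ih, List.foldl] <;> ring

-- pure recursive splitter
def pvSplitPure (cur : List Int) : List Int → List (List Int)
  | [] => [cur]
  | i :: t => if i = 0 then cur :: pvSplitPure [] t else pvSplitPure (cur ++ [i]) t

lemma pvSplit_fold (l : List Int) : ∀ (segs : List (List Int)) (cur : List Int),
    (l.foldl pvSplitStep (segs, cur)).1 ++ [(l.foldl pvSplitStep (segs, cur)).2]
      = segs ++ pvSplitPure cur l := by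
  induction l with
  | nil => intro segs cur; simp [pvSplitPure]
  | cons i t ih =>
    intro segs cur
    by_cases hi : i = 0
    · simp [hi, pvSplitPure, pvSplitStep, List.foldl, ih]
    · simp [hi, pvSplitPure, pvSplitStep, List.foldl, ih]

-- alternating combination of a list of segments
def pvAlt : List (List Int) → Int
  | [] => 0
  | s :: r => s.sum - pvAlt r

lemma pvCombine_fold (segs : List (List Int)) : ∀ (total sign : Int),
    (segs.foldl pvCombineStep (total, sign)).1 = total + sign * pvAlt segs := by
  induction segs with
  | nil => intro total sign; simp [pvAlt]
  | cons s r ih =>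
    intro total sign
    simp [List.foldl, pvCombineStep, pvAlt, ih]
    ring

lemma pvG_neg (l : List Int) : pvG true l = -pvG false l := by
  induction l with
  | nil => simp [pvG]
  | cons i t ih =>
    by_cases hi : i = 0
    · simp [pvG, hi, ih]
    · simp [pvG, hi, ih]; ring

lemma pvAlt_split (l : List Int) : ∀ (cur : List Int),
    pvAlt (pvSplitPure cur l) = cur.sum + pvG false l := by
  induction l with
  | nil => intro cur; simp [pvSplitPure, pvAlt, pvG]
  | cons i t ih =>
    intro cur
    by_cases hi : i = 0
    · simp [pvSplitPure, hi, pvAlt, ih, pvG, pvG_neg]; ring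
    · simp [pvSplitPure, hi, ih, pvG]; ring

-- ===== VERDICT (by name: the statement is the Claim_ definition above) =====
theorem add_or_subtract_spec : Claim_equal_add_or_subtract := by
  intro numbers _
  unfold Spec_add_or_subtract add_or_subtract add_or_subtract_alt
  rw [pvA_fold]
  show _ = (List.foldl pvCombineStep (0, 1) ((List.foldl pvSplitStep ([], []) numbers).1 ++ [(List.foldl pvSplitStep ([], []) numbers).2])).1
  have h := pvSplit_fold numbers [] []
  simp only [List.nil_append] at h
  rw [h, pvCombine_fold, pvAlt_split]
  simp
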